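-- pv_equiv track=rewrite | github.com/terencesll/AdventOfCode | 2018/02a.py | getCharCountSet
-- ===== SOURCE A (Python) =====
-- def getCharCountSet(boxId):
--     charCount = {}
--     for i in boxId:
--         if i not in charCount:
--             charCount[i] = 1
--         else:
--             charCount[i] += 1
--     charCountSet = set()
--     for k,v in charCount.items():
--         charCountSet.add(v)
--     return charCountSet
-- ===== SOURCE B (Python) =====
-- def getCharCountSet(boxId):
--     # Recursive partition: strip all occurrences of the first character,
--     # its count is the length drop; recurse on the remainder.
--     if not boxId:
--         return set()
--     c = boxId[0]
--     rest = ''.join(ch for ch in boxId if ch != c)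
--     return {len(boxId) - len(rest)} | getCharCountSet(rest)
-- ===== Notes on version B (the rewrite author's own statement) =====
-- stated objective: alternative
-- what changed: Replaces the dict-counting pass plus items loop by a recursive partition: strip every occurrence of the first character, record its frequency as the length drop, and recurse on the remaining characters; no dictionary is built.
import Mathlib
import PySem

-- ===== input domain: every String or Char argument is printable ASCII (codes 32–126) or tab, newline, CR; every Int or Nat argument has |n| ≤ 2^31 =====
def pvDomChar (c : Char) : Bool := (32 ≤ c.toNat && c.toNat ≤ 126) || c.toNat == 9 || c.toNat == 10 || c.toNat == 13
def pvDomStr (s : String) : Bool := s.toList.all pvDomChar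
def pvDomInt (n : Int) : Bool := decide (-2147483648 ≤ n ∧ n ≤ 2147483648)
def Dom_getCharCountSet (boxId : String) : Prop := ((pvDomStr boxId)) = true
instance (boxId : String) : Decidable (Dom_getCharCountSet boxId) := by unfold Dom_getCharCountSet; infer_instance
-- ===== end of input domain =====

-- B replaces A's dict-counting loop + items loop by a recursive partition on the first character (alternative decomposition, not faster).

-- ===== PORT A =====
def getCharCountSet (boxId : String) : List Int :=
  let charCount : PySem.Dict Char Int :=
    boxId.toList.foldl
      (fun d i => if d.contains i = false then d.insert i 1 else d.insert i (d.getD i 0 + 1))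
      PySem.Dict.empty
  charCount.items.foldl (fun s kv => PySem.Set.add s kv.2) PySem.Set.empty

-- ===== PORT B =====
-- 'if not boxId: return set()'; 'rest = ''.join(ch for ch in boxId if ch != c)' with c = boxId[0];
-- 'return {len(boxId) - len(rest)} | getCharCountSet(rest)'
def getCharCountSetGo : List Char → PySem.Set Int
  | [] => PySem.Set.empty
  | c :: cs =>
    let rest := (c :: cs).filter (fun ch => !(ch == c))
    PySem.Set.union (PySem.Set.ofList [((c :: cs).length : Int) - (rest.length : Int)])
      (getCharCountSetGo rest)
termination_by xs => xs.length
decreasing_by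
  simp only [List.filter_cons, beq_self_eq_true, Bool.not_true, List.length_cons]
  exact Nat.lt_succ_of_le (List.length_filter_le _ cs)

def getCharCountSet_alt (boxId : String) : List Int :=
  getCharCountSetGo boxId.toList

-- ===== PRECONDITION & SPEC =====
def Spec_getCharCountSet (boxId : String) (out : List Int) : Prop := out = getCharCountSet_alt boxId
instance (boxId : String) (out : List Int) : Decidable (Spec_getCharCountSet boxId out) := by unfold Spec_getCharCountSet; infer_instance

-- ===== CLAIM =====
def Claim_equal_getCharCountSet : Prop := ∀ (boxId : String), Dom_getCharCountSet boxId → Spec_getCharCountSet boxId (getCharCountSet boxId)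

-- ===== LEMMAS AND PROOFS =====

-- A's counting loop is the standard counter loop: on a missing key both branches insert the same value.
lemma counting_loop_eq (xs : List Char) :
    xs.foldl
      (fun d i => if d.contains i = false then d.insert i 1 else d.insert i (d.getD i 0 + 1))
      PySem.Dict.empty
      = PySem.Dict.counter xs := by
  have hf : (fun (d : PySem.Dict Char Int) i =>
      if d.contains i = false then d.insert i 1 else d.insert i (d.getD i 0 + 1))
      = (fun d i => d.insert i (d.getD i 0 + 1)) := by
    funext d i
    by_cases h : d.contains i = false
    · simp [h, PySem.Dict.getD_of_not_contains d 0 h]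
    · simp [h]
  rw [hf, PySem.Dict.foldl_insert_getD_add_one_eq_counter]

lemma add_of_mem {α : Type} [BEq α] [LawfulBEq α] (s : PySem.Set α) {x : α} (h : x ∈ s) :
    PySem.Set.add s x = s := by
  simp [PySem.Set.add, PySem.Set.contains, h]

lemma add_of_not_mem {α : Type} [BEq α] [LawfulBEq α] (s : PySem.Set α) {x : α} (h : x ∉ s) :
    PySem.Set.add s x = s ++ [x] := by
  simp [PySem.Set.add, PySem.Set.contains, h]

lemma mem_foldl_add {α : Type} [BEq α] [LawfulBEq α] (t : List α) (s : PySem.Set α) (x : α) :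
    x ∈ t.foldl PySem.Set.add s ↔ x ∈ s ∨ x ∈ t := by
  induction t generalizing s with
  | nil => simp
  | cons y t ih =>
    simp only [List.foldl_cons, ih, PySem.Set.mem_add, List.mem_cons]
    tauto

lemma foldl_add_add {α : Type} [BEq α] [LawfulBEq α] (s t : PySem.Set α) (v : α) :
    (PySem.Set.add t v).foldl PySem.Set.add s = PySem.Set.add (t.foldl PySem.Set.add s) v := by
  by_cases hv : v ∈ t
  · rw [add_of_mem t hv, add_of_mem _ ((mem_foldl_add t s v).2 (Or.inr hv))]
  · rw [add_of_not_mem t hv, List.foldl_append, List.foldl_cons, List.foldl_nil]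

lemma foldl_add_assoc {α : Type} [BEq α] [LawfulBEq α] (vs : List α) (s t : PySem.Set α) :
    (vs.foldl PySem.Set.add t).foldl PySem.Set.add s
      = vs.foldl PySem.Set.add (t.foldl PySem.Set.add s) := by
  induction vs generalizing t with
  | nil => rfl
  | cons v vs ih => rw [List.foldl_cons, ih, List.foldl_cons, foldl_add_add]

-- updating a set with set(vs) is updating it with vs
lemma foldl_add_ofList {α : Type} [BEq α] [LawfulBEq α] (s : PySem.Set α) (vs : List α) :
    (PySem.Set.ofList vs).foldl PySem.Set.add s = vs.foldl PySem.Set.add s := by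
  rw [PySem.Set.ofList_eq_foldl, foldl_add_assoc]
  rfl

lemma ofList_cons_foldl {α : Type} [BEq α] (x : α) (l : List α) :
    PySem.Set.ofList (x :: l) = l.foldl PySem.Set.add [x] := by
  rw [PySem.Set.ofList_eq_foldl, List.foldl_cons]
  rfl

-- pouring cs into the set s appends the deduplicated unseen elements
lemma foldl_add_eq_append (n : ℕ) :
    ∀ (cs : List Char), cs.length ≤ n → ∀ (s : PySem.Set Char),
      cs.foldl PySem.Set.add s
        = s ++ PySem.Set.ofList (cs.filter (fun y => !(decide (y ∈ s)))) := by
  induction n with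
  | zero =>
    intro cs h s
    have : cs = [] := List.eq_nil_of_length_eq_zero (Nat.le_zero.1 h)
    simp [this, PySem.Set.ofList, PySem.Set.empty]
  | succ n ih =>
    intro cs h s
    match cs with
    | [] => simp [PySem.Set.ofList, PySem.Set.empty]
    | x :: cs =>
      have h' : cs.length ≤ n := by
        simp only [List.length_cons, Nat.succ_le_succ_iff] at h
        exact h
      by_cases hx : x ∈ s
      · rw [List.foldl_cons, add_of_mem s hx, ih cs h' s]
        have hfil : (x :: cs).filter (fun y => !(decide (y ∈ s)))
            = cs.filter (fun y => !(decide (y ∈ s))) := by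
          simp [hx]
        rw [hfil]
      · rw [List.foldl_cons, add_of_not_mem s hx, ih cs h' (s ++ [x])]
        have hfil : (x :: cs).filter (fun y => !(decide (y ∈ s)))
            = x :: cs.filter (fun y => !(decide (y ∈ s))) := by
          simp [hx]
        rw [hfil, ofList_cons_foldl,
            ih (cs.filter (fun y => !(decide (y ∈ s))))
              (le_trans (List.length_filter_le _ _) h') ([x] : PySem.Set Char),
            List.filter_filter, List.append_assoc, List.singleton_append]
        congr 3
        apply List.filter_congr
        intro y _
        by_cases h1 : y ∈ s <;> by_cases h2 : y = x <;>
          simp [h1, h2, List.mem_append]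
-- set(x :: cs) is x followed by set of the non-x elements
lemma ofList_cons (x : Char) (cs : List Char) :
    PySem.Set.ofList (x :: cs) = x :: PySem.Set.ofList (cs.filter (fun y => !(y == x))) := by
  rw [ofList_cons_foldl, foldl_add_eq_append cs.length cs le_rfl [x], List.singleton_append]
  have hp : (fun (y : Char) => !(decide (y ∈ ([x] : PySem.Set Char)))) = fun y => !(y == x) := by
    funext y
    by_cases h : y = x <;> simp [h]
  rw [hp]

-- run length of the stripped character as a count
lemma count_length_drop (c : Char) (cs : List Char) :
    ((c :: cs).length : Int) - ((cs.filter (fun y => !(y == c))).length : Int)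
      = ((List.count c (c :: cs) : Nat) : Int) := by
  have hlen : (cs.filter (fun y => !(y == c))).length = cs.countP (fun y => !(y == c)) :=
    List.countP_eq_length_filter.symm
  have hsplit := List.length_eq_countP_add_countP (p := fun y => y == c) (l := cs)
  have hcongr : cs.countP (fun a => decide ¬((a == c) = true)) = cs.countP (fun y => !(y == c)) :=
    List.countP_congr (by intro a _; by_cases h : a = c <;> simp [h])
  have hc : List.count c cs = cs.countP (fun y => y == c) := List.count_eq_countP
  have h2 : List.count c (c :: cs) = List.count c cs + 1 := List.count_cons_self
  rw [h2]
  simp only [List.length_cons]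
  rw [hlen]
  rw [hcongr] at hsplit
  omega

-- the core equivalence: B's recursion computes the set of counter values
lemma go_eq (xs : List Char) :
    getCharCountSetGo xs
      = PySem.Set.ofList ((PySem.Set.ofList xs).map (fun k => ((List.count k xs : Nat) : Int))) := by
  induction xs using getCharCountSetGo.induct with
  | case1 => simp [getCharCountSetGo, PySem.Set.ofList, PySem.Set.empty]
  | case2 c cs rest ih =>
    have hrest : rest = cs.filter (fun y => !(y == c)) := by
      simp [rest]
    rw [getCharCountSetGo]
    show PySem.Set.union
        (PySem.Set.ofList [((c :: cs).length : Int) - (rest.length : Int)])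
        (getCharCountSetGo rest)
      = _
    rw [hrest] at ih ⊢
    rw [PySem.Set.union, ih]
    show (PySem.Set.ofList ((PySem.Set.ofList (cs.filter (fun y => !(y == c)))).map
        (fun k => ((List.count k (cs.filter (fun y => !(y == c))) : Nat) : Int)))).foldl
        PySem.Set.add
        (PySem.Set.ofList [((c :: cs).length : Int) - ((cs.filter (fun y => !(y == c))).length : Int)])
      = _
    rw [foldl_add_ofList, count_length_drop]
    have hofl : PySem.Set.ofList [((List.count c (c :: cs) : Nat) : Int)]
        = [((List.count c (c :: cs) : Nat) : Int)] := rfl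
    rw [hofl, ← ofList_cons_foldl, ofList_cons c cs, List.map_cons]
    have hmap : (PySem.Set.ofList (cs.filter (fun y => !(y == c)))).map
          (fun k => ((List.count k (cs.filter (fun y => !(y == c))) : Nat) : Int))
        = (PySem.Set.ofList (cs.filter (fun y => !(y == c)))).map
          (fun k => ((List.count k (c :: cs) : Nat) : Int)) := by
      apply List.map_congr_left
      intro k hk
      have hk' : k ∈ cs.filter (fun y => !(y == c)) := (PySem.Set.mem_ofList _ k).1 hk
      have hkc : k ≠ c := by
        have := List.of_mem_filter hk'
        simpa using this
      have h1 : List.count k (c :: cs) = List.count k cs :=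
        List.count_cons_of_ne (Ne.symm hkc)
      have h2 : List.count k (cs.filter (fun y => !(y == c))) = List.count k cs :=
        List.count_filter (by simpa using hkc)
      rw [h1, h2]
    rw [hmap]

-- ===== VERDICT =====
theorem getCharCountSet_spec : Claim_equal_getCharCountSet := by
  intro boxId _
  unfold Spec_getCharCountSet getCharCountSet getCharCountSet_alt
  rw [counting_loop_eq]
  show (PySem.Dict.counter boxId.toList).items.foldl (fun s kv => PySem.Set.add s kv.2) PySem.Set.empty = _
  rw [PySem.Dict.items_counter, go_eq]
  rw [List.foldl_map]
  conv_rhs => rw [PySem.Set.ofList_eq_foldl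
    ((PySem.Set.ofList boxId.toList).map (fun k => ((List.count k boxId.toList : Nat) : Int))),
    List.foldl_map]
  rfl
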